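-- pv_equiv track=rewrite | github.com/serega100/ImaevIntensive | 25_1/25_11.py | get_F
-- ===== SOURCE A (Python) =====
-- def get_F(n):
--     ds = []
--     d = 2
--     while d * d < n:
--         if n % d == 0:
--             ds += [d, n//d]
--         d += 1
--     if d * d == n:
--         ds += [d]
--
--     if len(ds) != 0:
--         return max(ds) - min(ds)
--     else:
--         return 0
-- ===== SOURCE B (Python) =====
-- def get_F(n):
--     # difference of largest and smallest proper divisor of n (0 if none):
--     # the smallest divisor d determines the largest as n//d
--     d = 2
--     while d * d <= n:
--         if n % d == 0:
--             return n // d - d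
--         d += 1
--     return 0
-- ===== Notes on version B (the rewrite author's own statement) =====
-- stated objective: simpler
-- what changed: B returns n//d - d at the first divisor d with d*d <= n instead of collecting all divisor pairs into a list and taking max - min; no list, no max/min pass.
import Mathlib
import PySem

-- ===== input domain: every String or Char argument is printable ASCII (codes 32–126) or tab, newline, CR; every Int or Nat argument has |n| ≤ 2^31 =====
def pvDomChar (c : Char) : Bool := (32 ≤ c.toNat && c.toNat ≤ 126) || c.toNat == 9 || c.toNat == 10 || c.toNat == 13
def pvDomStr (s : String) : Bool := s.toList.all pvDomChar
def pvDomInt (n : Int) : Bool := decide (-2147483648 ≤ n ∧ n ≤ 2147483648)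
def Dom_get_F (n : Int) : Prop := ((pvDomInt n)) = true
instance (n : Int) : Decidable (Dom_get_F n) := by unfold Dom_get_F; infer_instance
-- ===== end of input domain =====

-- B finds only the smallest divisor d (d*d <= n) and returns n//d - d directly,
-- instead of A's list of all divisor pairs followed by max - min; objective: simpler.
-- Both loops carry a Nat fuel (n.toNat, enough for every run) purely as a totality guard.

-- ===== PORT A =====
-- A's while loop: accumulates divisor pairs into ds, returns (ds, final d)
def getFLoopA (n : Int) (fuel : Nat) (ds : List Int) (d : Int) : List Int × Int :=
  match fuel with
  | 0 => (ds, d)          -- never reached when fuel ≥ number of remaining iterations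
  | fuel + 1 =>
    if d * d < n then
      if PySem.Int.mod n d = 0 then
        getFLoopA n fuel (ds ++ [d, PySem.Int.floordiv n d]) (d + 1)
      else
        getFLoopA n fuel ds (d + 1)
    else (ds, d)

-- A's code after the while loop
def getFFinishA (n : Int) (st : List Int × Int) : Int :=
  let ds := if st.2 * st.2 = n then st.1 ++ [st.2] else st.1
  if ds.length ≠ 0 then
    (PySem.List.max? ds (fun x => x)).getD 0 - (PySem.List.min? ds (fun x => x)).getD 0
  else 0

def get_F (n : Int) : Int := getFFinishA n (getFLoopA n n.toNat [] 2)

-- ===== PORT B =====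
def getFLoopB (n : Int) (fuel : Nat) (d : Int) : Int :=
  match fuel with
  | 0 => 0                -- never reached when fuel ≥ number of remaining iterations
  | fuel + 1 =>
    if d * d ≤ n then
      if PySem.Int.mod n d = 0 then PySem.Int.floordiv n d - d
      else getFLoopB n fuel (d + 1)
    else 0

def get_F_alt (n : Int) : Int := getFLoopB n n.toNat 2

-- ===== PRECONDITION & SPEC =====
def Spec_get_F (n : Int) (out : Int) : Prop := out = get_F_alt n
instance (n : Int) (out : Int) : Decidable (Spec_get_F n out) := by unfold Spec_get_F; infer_instance

-- ===== CLAIM (what is proved, stated in full; the proofs are below) =====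
def Claim_equal_get_F : Prop := ∀ (n : Int), Dom_get_F n → Spec_get_F n (get_F n)

-- ===== LEMMAS AND PROOFS =====

-- max(ds) - min(ds) = q - p when p,q ∈ ds and every element lies in [p,q]
lemma getF_extrema (ds : List Int) (p q : Int)
    (hp : p ∈ ds) (hq : q ∈ ds) (hb : ∀ x ∈ ds, p ≤ x ∧ x ≤ q) :
    (PySem.List.max? ds (fun x => x)).getD 0 - (PySem.List.min? ds (fun x => x)).getD 0 = q - p := by
  have hne : ds ≠ [] := by intro h; simp [h] at hp
  obtain ⟨M, hM⟩ : ∃ M, PySem.List.max? ds (fun x => x) = some M := by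
    cases hMx : PySem.List.max? ds (fun x => x) with
    | none => exact absurd ((PySem.List.max?_eq_none_iff _ _).mp hMx) hne
    | some M => exact ⟨M, rfl⟩
  obtain ⟨m, hm⟩ : ∃ m, PySem.List.min? ds (fun x => x) = some m := by
    cases hmx : PySem.List.min? ds (fun x => x) with
    | none => exact absurd ((PySem.List.min?_eq_none_iff _ _).mp hmx) hne
    | some m => exact ⟨m, rfl⟩
  have hMq : M = q := by
    have h1 := (hb M (PySem.List.max?_mem hM)).2
    have h2 := PySem.List.max?_isMax hM q hq
    omega
  have hmp : m = p := by
    have h1 := (hb m (PySem.List.min?_mem hm)).1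
    have h2 := PySem.List.min?_isMin hm p hp
    omega
  simp [hM, hm, hMq, hmp]

-- exit of A's loop while holding the smallest divisor p: finish yields n/p - p
lemma getF_finish2 (n p d : Int) (ds : List Int)
    (hp2 : 2 ≤ p) (hpn : p * p < n)
    (hge : ¬ d * d < n) (hpd : p ≤ d)
    (hpin : p ∈ ds) (hnpin : n / p ∈ ds) (hb : ∀ x ∈ ds, p ≤ x ∧ x ≤ n / p) :
    getFFinishA n (ds, d) = n / p - p := by
  unfold getFFinishA
  by_cases hsq : d * d = n
  · have hd_ub : d ≤ n / p := Int.le_ediv_iff_mul_le (by omega) |>.mpr (by nlinarith)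
    have hb' : ∀ x ∈ ds ++ [d], p ≤ x ∧ x ≤ n / p := by
      intro x hx
      rcases List.mem_append.mp hx with h | h
      · exact hb x h
      · simp at h; subst h; exact ⟨hpd, hd_ub⟩
    simp only [hsq, if_pos]
    rw [if_pos (by simp)]
    exact getF_extrema _ p (n / p) (by simp [hpin]) (by simp [hnpin]) hb'
  · simp only [if_neg hsq]
    rw [if_pos (by intro h; rw [List.length_eq_zero_iff] at h; simp [h] at hpin)]
    exact getF_extrema ds p (n / p) hpin hnpin hb

-- phase 2: once p, n/p are in ds and all elements of ds lie in [p, n/p],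
-- A's remaining run followed by the finish yields n/p - p
lemma getF_phase2 (n p : Int) (hp2 : 2 ≤ p) (hpn : p * p < n) :
    ∀ (fa : Nat) (d : Int) (ds : List Int), (n - d).toNat ≤ fa →
    p ≤ d → p ∈ ds → n / p ∈ ds → (∀ x ∈ ds, p ≤ x ∧ x ≤ n / p) →
    getFFinishA n (getFLoopA n fa ds d) = n / p - p := by
  have hn0 : 0 < n := by nlinarith
  intro fa
  induction fa with
  | zero =>
    intro d ds hm hpd hpin hnpin hb
    have hnd : n ≤ d := by omega
    have hge : ¬ d * d < n := by nlinarith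
    exact getF_finish2 n p d ds hp2 hpn hge hpd hpin hnpin hb
  | succ fa ih =>
    intro d ds hm hpd hpin hnpin hb
    by_cases hlt : d * d < n
    · have hdn : d < n := by nlinarith
      have hd0 : (0:Int) < d := by omega
      have hm' : (n - (d + 1)).toNat ≤ fa := by omega
      rw [getFLoopA, if_pos hlt]
      by_cases hmod : PySem.Int.mod n d = 0
      · rw [if_pos hmod]
        have hddvd : d ∣ n := (PySem.Int.mod_eq_zero_iff_dvd n d).mp hmod
        have hfd : PySem.Int.floordiv n d = n / d := PySem.Int.floordiv_eq_ediv_of_pos hd0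
        have hd_ub : d ≤ n / p := Int.le_ediv_iff_mul_le (by omega) |>.mpr (by nlinarith)
        have hnd_lb : p ≤ n / d := Int.le_ediv_iff_mul_le hd0 |>.mpr (by nlinarith)
        have hnd0 : 0 ≤ n / d := Int.ediv_nonneg (le_of_lt hn0) (le_of_lt hd0)
        have hnd_ub : n / d ≤ n / p := by
          rw [Int.le_ediv_iff_mul_le (by omega : (0:Int) < p)]
          calc n / d * p ≤ n / d * d := by nlinarith
            _ = n := Int.ediv_mul_cancel hddvd
        refine ih (d + 1) _ hm' (by omega) (by simp [hpin]) (by simp [hnpin]) ?_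
        intro x hx
        rcases List.mem_append.mp hx with h | h
        · exact hb x h
        · rw [hfd] at h
          rcases List.mem_cons.mp h with h | h
          · subst h; exact ⟨hpd, hd_ub⟩
          · simp at h; subst h; exact ⟨hnd_lb, hnd_ub⟩
      · rw [if_neg hmod]
        exact ih (d + 1) ds hm' (by omega) hpin hnpin hb
    · rw [getFLoopA, if_neg hlt]
      exact getF_finish2 n p d ds hp2 hpn hlt hpd hpin hnpin hb

-- exit of A's loop with an empty ds and no divisor found below d: A's finish
-- equals what B returns from d (any fuel: B exits or returns immediately, or is out of fuel with value 0)
lemma getF_finish1 (n d : Int) (fb : Nat) (hd2 : 2 ≤ d) (hge : ¬ d * d < n) :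
    getFFinishA n (([] : List Int), d) = getFLoopB n fb d := by
  unfold getFFinishA
  by_cases hsq : d * d = n
  · have hd0 : (0:Int) < d := by nlinarith
    have hddvd : d ∣ n := ⟨d, hsq.symm⟩
    have hmod : PySem.Int.mod n d = 0 := (PySem.Int.mod_eq_zero_iff_dvd n d).mpr hddvd
    have hfd : PySem.Int.floordiv n d = n / d := PySem.Int.floordiv_eq_ediv_of_pos hd0
    have hnd : n / d = d := by
      rw [← hsq]; exact Int.mul_ediv_cancel_left d (by omega)
    simp only [hsq, if_pos]
    rw [if_pos (by simp), getF_extrema _ d d (by simp) (by simp) (by simp)]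
    cases fb with
    | zero => simp [getFLoopB]
    | succ fb =>
      rw [getFLoopB, if_pos (by omega), if_pos hmod, hfd, hnd]
  · have hgt : ¬ d * d ≤ n := by omega
    cases fb with
    | zero => simp [hsq, getFLoopB]
    | succ fb => rw [getFLoopB, if_neg hgt]; simp [hsq]

-- phase 1: while no divisor has been found yet, A's remaining run equals B's
lemma getF_phase1 (n : Int) :
    ∀ (fa fb : Nat) (d : Int), (n - d).toNat ≤ fa → ((n + 1) - d).toNat ≤ fb → 2 ≤ d →
    (∀ k, 2 ≤ k → k < d → ¬ (k ∣ n)) →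
    getFFinishA n (getFLoopA n fa [] d) = getFLoopB n fb d := by
  intro fa
  induction fa with
  | zero =>
    intro fb d hma hmb hd2 hnd
    have hledn : n ≤ d := by omega
    have hge : ¬ d * d < n := by nlinarith
    exact getF_finish1 n d fb hd2 hge
  | succ fa ih =>
    intro fb d hma hmb hd2 hnd
    by_cases hlt : d * d < n
    · have hdn : d < n := by nlinarith
      have hd0 : (0:Int) < d := by omega
      obtain ⟨fb', rfl⟩ : ∃ fb', fb = fb' + 1 := by
        cases fb with
        | zero => exfalso; omega
        | succ fb' => exact ⟨fb', rfl⟩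
      rw [getFLoopA, if_pos hlt]
      by_cases hmod : PySem.Int.mod n d = 0
      · rw [if_pos hmod]
        have hddvd : d ∣ n := (PySem.Int.mod_eq_zero_iff_dvd n d).mp hmod
        have hfd : PySem.Int.floordiv n d = n / d := PySem.Int.floordiv_eq_ediv_of_pos hd0
        have hd_ub : d ≤ n / d := Int.le_ediv_iff_mul_le hd0 |>.mpr (le_of_lt hlt)
        rw [getFLoopB, if_pos (le_of_lt hlt), if_pos hmod, hfd]
        exact getF_phase2 n d hd2 hlt fa (d + 1) _ (by omega) (by omega)
          (by simp) (by simp) (by simp; omega)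
      · rw [if_neg hmod]
        rw [getFLoopB, if_pos (le_of_lt hlt), if_neg hmod]
        refine ih fb' (d + 1) (by omega) (by omega) (by omega) ?_
        intro k hk2 hkd hkdvd
        rcases lt_or_eq_of_le (by omega : k ≤ d) with h | h
        · exact hnd k hk2 h hkdvd
        · subst h
          exact hmod ((PySem.Int.mod_eq_zero_iff_dvd n k).mpr hkdvd)
    · rw [getFLoopA, if_neg hlt]
      exact getF_finish1 n d fb hd2 hlt

-- ===== VERDICT (by name: the statement is the Claim_ definition above) =====
theorem get_F_spec : Claim_equal_get_F := by
  intro n _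
  unfold Spec_get_F get_F get_F_alt
  exact getF_phase1 n n.toNat n.toNat 2 (by omega) (by omega) (by omega) (by omega)
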